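-- pv_equiv track=rewrite | github.com/Firefly-rk-linux-utils/ffmedia_release | demo/demo.py | find_two_numbers
-- ===== SOURCE A (Python) =====
-- def find_two_numbers(n, x, y):
--     a = 1
--     b = n
--     min_diff = 8192
--     while a <= b:
--         if n % a == 0:
--             b = n // a
--             diff1 = abs(a - x) + abs(b - y)
--             diff2 = abs(a - y) + abs(b - x)
--             if diff1 < min_diff or diff2 < min_diff:
--                 if diff1 < diff2:
--                     result = (a, b)
--                 else:
--                     result = (b, a)
--                 min_diff = min(diff1, diff2)
--         a += 1
--     return result
-- ===== SOURCE B (Python) =====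
-- def find_two_numbers(n, x, y):
--     # A factor pair can beat the 8192 threshold only if one of its members lies
--     # within 8191 of x or of y, so scan just those two windows (clipped to
--     # [1, n]) for divisors instead of scanning every divisor of n.
--     best = None
--     for lo, hi in ((x - 8191, x + 8191), (y - 8191, y + 8191)):
--         for a in range(max(1, lo), min(n, hi) + 1):
--             if n % a == 0:
--                 b = n // a
--                 s = min(abs(a - x) + abs(b - y), abs(a - y) + abs(b - x))
--                 if best is None or (s, a) < best:
--                     best = (s, a)
--     s, a = best
--     b = n // a
--     if abs(a - x) + abs(b - y) < abs(a - y) + abs(b - x):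
--         return (a, b)
--     return (b, a)
-- ===== Notes on version B (the rewrite author's own statement) =====
-- stated objective: faster
-- what changed: A scans every candidate a from 1 upward (up to n when n is prime) tracking the best factor pair; B only scans the two windows [x-8191, x+8191] and [y-8191, y+8191] clipped to [1, n] -- a pair can beat A's 8192 threshold only if one member lies in a window -- and keeps the lexicographically smallest (score, divisor), so its work is bounded by ~32766 iterations independent of n.
import Mathlib
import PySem

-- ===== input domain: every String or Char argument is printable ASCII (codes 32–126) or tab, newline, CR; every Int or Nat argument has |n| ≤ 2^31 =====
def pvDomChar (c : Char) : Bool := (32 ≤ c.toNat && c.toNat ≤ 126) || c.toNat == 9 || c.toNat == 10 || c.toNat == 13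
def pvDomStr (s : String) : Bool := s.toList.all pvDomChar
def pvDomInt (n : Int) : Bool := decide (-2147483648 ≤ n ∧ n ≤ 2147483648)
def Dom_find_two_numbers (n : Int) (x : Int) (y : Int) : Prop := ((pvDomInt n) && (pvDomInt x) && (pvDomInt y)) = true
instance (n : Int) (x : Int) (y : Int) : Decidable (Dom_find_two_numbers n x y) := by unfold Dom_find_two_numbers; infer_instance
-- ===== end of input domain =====

-- B replaces A's scan of all a in [1, n//last_divisor] by a scan of the two windows
-- [x-8191, x+8191] and [y-8191, y+8191] (clipped to [1, n]): a pair can beat A's 8192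
-- threshold only if one of its members lies in a window, so the candidate set is
-- exhaustive and its size is independent of n.

-- ===== PORT A =====
-- A's while-loop; `result` starts unbound (`none`); fuel only makes the recursion structural
-- (the fuel supplied below is provably enough, see pvLoopA_eq/find_two_numbers_spec).
def pvLoopA (n x y : Int) (fuel : Nat) (a b min_diff : Int) (result : Option (Int × Int)) :
    Option (Int × Int) :=
  match fuel with
  | 0 => result
  | fuel + 1 =>
    if a ≤ b then
      if PySem.Int.mod n a = 0 then
        let b' := PySem.Int.floordiv n a
        let diff1 := |a - x| + |b' - y|
        let diff2 := |a - y| + |b' - x|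
        if diff1 < min_diff ∨ diff2 < min_diff then
          pvLoopA n x y fuel (a + 1) b' (min diff1 diff2)
            (some (if diff1 < diff2 then (a, b') else (b', a)))
        else pvLoopA n x y fuel (a + 1) b' min_diff result
      else pvLoopA n x y fuel (a + 1) b min_diff result
    else result

def find_two_numbers (n : Int) (x : Int) (y : Int) : Int × Int :=
  match pvLoopA n x y (n + 2).toNat 1 n 8192 none with
  | some r => r
  | none => (0, 0)  -- Python raises UnboundLocalError here; excluded by Pre_

-- ===== PORT B =====
-- Source B's inner `for a in range(max(1, lo), min(n, hi) + 1)` candidate list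
def pvWindow (n lo hi : Int) : List Int :=
  PySem.List.pyRange (max 1 lo) (min n hi + 1) 1

-- Source B's loop body: on a divisor, keep the lexicographically smaller (s, a)
def pvStepB (n x y : Int) (best : Option (Int × Int)) (a : Int) : Option (Int × Int) :=
  if PySem.Int.mod n a = 0 then
    let b := PySem.Int.floordiv n a
    let s := min (|a - x| + |b - y|) (|a - y| + |b - x|)
    match best with
    | none => some (s, a)
    | some p => if s < p.1 ∨ (s = p.1 ∧ a < p.2) then some (s, a) else some p
  else best

def find_two_numbers_alt (n : Int) (x : Int) (y : Int) : Int × Int :=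
  match List.foldl (pvStepB n x y)
      (List.foldl (pvStepB n x y) none (pvWindow n (x - 8191) (x + 8191)))
      (pvWindow n (y - 8191) (y + 8191)) with
  | none => (0, 0)  -- Python raises TypeError unpacking None here; excluded by Pre_
  | some (_, a) =>
    let b := PySem.Int.floordiv n a
    if |a - x| + |b - y| < |a - y| + |b - x| then (a, b) else (b, a)

-- ===== PRECONDITION & SPEC =====
-- Pre_ excludes exactly the inputs on which A raises UnboundLocalError: n ≤ 0 (the loop
-- never runs) or no factor pair of n within L1-distance < 8192 of (x, y) (result never
-- assigned); a pair below the threshold forces a divisor within 8191 of x or of y, so the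
-- two windows below are an exhaustive, bounded search space (nothing else is excluded).
def Pre_find_two_numbers (n : Int) (x : Int) (y : Int) : Prop :=
  1 ≤ n ∧ ∃ a ∈ pvWindow n (x - 8191) (x + 8191) ++ pvWindow n (y - 8191) (y + 8191),
    PySem.Int.mod n a = 0 ∧
      min (|a - x| + |PySem.Int.floordiv n a - y|) (|a - y| + |PySem.Int.floordiv n a - x|) < 8192
instance (n : Int) (x : Int) (y : Int) : Decidable (Pre_find_two_numbers n x y) := by
  unfold Pre_find_two_numbers; infer_instance

def pvWitness_find_two_numbers : Int × Int × Int := (4, 2, 2)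

def Spec_find_two_numbers (n : Int) (x : Int) (y : Int) (out : Int × Int) : Prop :=
  out = find_two_numbers_alt n x y
instance (n : Int) (x : Int) (y : Int) (out : Int × Int) : Decidable (Spec_find_two_numbers n x y out) := by
  unfold Spec_find_two_numbers; infer_instance

-- ===== CLAIM (what is proved, stated in full; the proofs are below) =====
def Claim_equal_find_two_numbers : Prop := ∀ (n : Int) (x : Int) (y : Int), Dom_find_two_numbers n x y → Pre_find_two_numbers n x y → Spec_find_two_numbers n x y (find_two_numbers n x y)

-- ===== LEMMAS AND PROOFS =====

-- the score of a candidate divisor e: L1-distance of the better orientation of (e, n//e)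
def pvScore (n x y e : Int) : Int :=
  let b := PySem.Int.floordiv n e
  min (|e - x| + |b - y|) (|e - y| + |b - x|)

-- the orientation A and B both pick for a winning divisor e
def pvOrient (n x y e : Int) : Int × Int :=
  let b := PySem.Int.floordiv n e
  if |e - x| + |b - y| < |e - y| + |b - x| then (e, b) else (b, e)

-- one iteration of A's loop body, as a fold step over candidate divisors
def pvStepA (n x y : Int) (s : Int × Option (Int × Int)) (e : Int) : Int × Option (Int × Int) :=
  let b := PySem.Int.floordiv n e
  let d1 := |e - x| + |b - y|
  let d2 := |e - y| + |b - x|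
  if d1 < s.1 ∨ d2 < s.1 then (min d1 d2, some (if d1 < d2 then (e, b) else (b, e))) else s

-- the divisors of n in [a, √n], as a closed-form list
def pvSdivs (n a : Int) : List Int :=
  (PySem.List.pyRange a (n + 1) 1).filter
    (fun e => decide (e * e ≤ n) && decide (PySem.Int.mod n e = 0))

-- lexicographic ≤ on (score, divisor) pairs, Python's tuple order
def pvLexLe (p q : Int × Int) : Prop := p.1 < q.1 ∨ (p.1 = q.1 ∧ p.2 ≤ q.2)

lemma pv_ediv_le_ediv (n d a : Int) (hn : 0 ≤ n) (hd : 0 < d) (hda : d ≤ a) : n / a ≤ n / d := by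
  refine (Int.le_ediv_iff_mul_le hd).mpr ?_
  calc n / a * d ≤ n / a * a :=
        mul_le_mul_of_nonneg_left hda (Int.ediv_nonneg hn (by omega))
    _ ≤ n := Int.ediv_mul_le n (by omega)

lemma pvSdivs_eq_nil (n a : Int) (ha : 1 ≤ a) (h : n < a * a) : pvSdivs n a = [] := by
  unfold pvSdivs
  rw [List.filter_eq_nil_iff]
  intro e he
  rw [PySem.List.mem_pyRange_one] at he
  have : n < e * e := by nlinarith [he.1]
  simp [not_le.mpr this]

lemma pvSdivs_cons (n a : Int) (han : a ≤ n) :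
    pvSdivs n a =
      (if a * a ≤ n ∧ PySem.Int.mod n a = 0 then [a] else []) ++ pvSdivs n (a + 1) := by
  unfold pvSdivs
  rw [PySem.List.pyRange_one_cons (by omega), List.filter_cons]
  by_cases h1 : a * a ≤ n <;> by_cases h2 : PySem.Int.mod n a = 0 <;> simp [h1, h2]

lemma pv_mem_sdivs (n : Int) (e a : Int) (ha : 1 ≤ a) (hae : a ≤ e) (hsq : e * e ≤ n)
    (hmod : PySem.Int.mod n e = 0) : e ∈ pvSdivs n a := by
  unfold pvSdivs
  rw [List.mem_filter, PySem.List.mem_pyRange_one]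
  have hen : e ≤ n := le_trans (by nlinarith) hsq
  simp [hmod, hsq, hae, show e < n + 1 by omega]

lemma pv_sdivs_mem (n a e : Int) (he : e ∈ pvSdivs n a) :
    a ≤ e ∧ e ≤ n ∧ e * e ≤ n ∧ PySem.Int.mod n e = 0 := by
  unfold pvSdivs at he
  rw [List.mem_filter, PySem.List.mem_pyRange_one] at he
  obtain ⟨⟨h1, h2⟩, h3⟩ := he
  simp only [Bool.and_eq_true, decide_eq_true_eq] at h3
  exact ⟨h1, by omega, h3.1, h3.2⟩

lemma pv_sdivs_pairwise (n : Int) :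
    ∀ (k : Nat) (a : Int), 1 ≤ a → (n + 1 - a).toNat ≤ k →
      (pvSdivs n a).Pairwise (· < ·) := by
  intro k
  induction k with
  | zero =>
    intro a ha hk
    rw [pvSdivs_eq_nil n a ha (by nlinarith [show n < a by omega])]
    exact List.Pairwise.nil
  | succ k ih =>
    intro a ha hk
    by_cases han : a ≤ n
    · rw [pvSdivs_cons n a han]
      have htail := ih (a + 1) (by omega) (by omega)
      by_cases hc : a * a ≤ n ∧ PySem.Int.mod n a = 0
      · rw [if_pos hc, List.singleton_append]
        exact List.Pairwise.cons
          (fun e he => by have := (pv_sdivs_mem n (a + 1) e he).1; omega) htail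
      · rw [if_neg hc, List.nil_append]; exact htail
    · rw [pvSdivs_eq_nil n a ha (by nlinarith [show n < a by omega])]
      exact List.Pairwise.nil

-- symmetric score: the partner divisor has the same score
lemma pvScore_symm (n x y a p : Int) (h1 : PySem.Int.floordiv n a = p)
    (h2 : PySem.Int.floordiv n p = a) : pvScore n x y p = pvScore n x y a := by
  simp only [pvScore, h1, h2]
  rw [min_comm]
  ring_nf

-- a divisor a of n (1 ≤ a ≤ n) has a partner d ≤ a below √n with the same score
lemma pvPartner (n x y a : Int) (hn : 1 ≤ n) (h1 : 1 ≤ a) (han : a ≤ n)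
    (hd : PySem.Int.mod n a = 0) :
    ∃ d ∈ pvSdivs n 1, pvScore n x y d = pvScore n x y a ∧ d ≤ a := by
  have hdvd : a ∣ n := (PySem.Int.mod_eq_zero_iff_dvd n a).mp hd
  by_cases hsq : a * a ≤ n
  · exact ⟨a, pv_mem_sdivs n a 1 le_rfl h1 hsq hd, rfl, le_rfl⟩
  · set q := n / a with hq
    have hmul : q * a = n := Int.ediv_mul_cancel hdvd
    have hq1 : 1 ≤ q := (Int.le_ediv_iff_mul_le (by omega)).mpr (by omega)
    have hqa : q < a := by nlinarith
    have hqq : q * q ≤ n := by nlinarith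
    have hqdvd : q ∣ n := ⟨a, hmul.symm⟩
    have hfd : PySem.Int.floordiv n a = q := PySem.Int.floordiv_eq_ediv_of_pos (by omega)
    have hfq : PySem.Int.floordiv n q = a := by
      rw [PySem.Int.floordiv_eq_ediv_of_pos (by omega), ← hmul]
      exact Int.mul_ediv_cancel_left a (by omega)
    exact ⟨q, pv_mem_sdivs n q 1 le_rfl hq1 hqq ((PySem.Int.mod_eq_zero_iff_dvd n q).mpr hqdvd),
      pvScore_symm n x y a q hfd hfq, by omega⟩

lemma pvStepA_eq (n x y m : Int) (r : Option (Int × Int)) (e : Int) :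
    pvStepA n x y (m, r) e =
      if pvScore n x y e < m then (pvScore n x y e, some (pvOrient n x y e)) else (m, r) := by
  simp only [pvStepA, pvScore, pvOrient, min_lt_iff]

-- unfold one iteration of A's loop, with the body expressed as pvStepA
lemma pvLoopA_succ (n x y : Int) (fuel : Nat) (a b m : Int) (r : Option (Int × Int)) :
    pvLoopA n x y (fuel + 1) a b m r =
      if a ≤ b then
        if PySem.Int.mod n a = 0 then
          pvLoopA n x y fuel (a + 1) (PySem.Int.floordiv n a)
            (pvStepA n x y (m, r) a).1 (pvStepA n x y (m, r) a).2
        else pvLoopA n x y fuel (a + 1) b m r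
      else r := by
  show (if a ≤ b then _ else r) = _
  by_cases h1 : a ≤ b
  · simp only [if_pos h1]
    by_cases h2 : PySem.Int.mod n a = 0
    · simp only [if_pos h2, pvStepA]
      by_cases h3 : |a - x| + |PySem.Int.floordiv n a - y| < m ∨
          |a - y| + |PySem.Int.floordiv n a - x| < m <;> simp [h3]
    · simp [h2]
  · simp [h1]

lemma pvLoopA_exit (n x y : Int) (fuel : Nat) (a b m : Int) (r : Option (Int × Int))
    (h : ¬ a ≤ b) : pvLoopA n x y fuel a b m r = r := by
  cases fuel with
  | zero => rfl
  | succ fuel => show (if a ≤ b then _ else r) = r; rw [if_neg h]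

-- A's loop, from any state reachable with last divisor d, equals the fold of its body
-- over the remaining divisors up to √n.
lemma pvLoopA_eq (n x y : Int) (hn : 1 ≤ n) :
    ∀ (fuel : Nat) (a b d m : Int) (r : Option (Int × Int)),
      (b + 1 - a).toNat ≤ fuel →
      1 ≤ d → d < a → d ∣ n → b = n / d →
      (∀ e, d < e → e < a → ¬ e ∣ n) →
      (∀ e, 1 ≤ e → e < a → e ∣ n → m ≤ pvScore n x y e) →
      pvLoopA n x y fuel a b m r = (List.foldl (pvStepA n x y) (m, r) (pvSdivs n a)).2 := by
  intro fuel
  induction fuel with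
  | zero =>
    intro a b d m r hk h1d hda hdd hb hnod hmin
    have ha1 : (1:Int) ≤ a := by omega
    have hnaa : n < a * a := by
      by_contra hc
      push Not at hc
      have h1 : a ≤ n / a := (Int.le_ediv_iff_mul_le (by omega)).mpr hc
      have h2 : n / a ≤ n / d := pv_ediv_le_ediv n d a (by omega) (by omega) (by omega)
      omega
    rw [pvSdivs_eq_nil n a ha1 hnaa]; rfl
  | succ fuel ih =>
    intro a b d m r hk h1d hda hdd hb hnod hmin
    have ha1 : (1:Int) ≤ a := by omega
    rw [pvLoopA_succ]
    by_cases hab : a ≤ b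
    case neg =>
      have hnaa : n < a * a := by
        by_contra hc
        push Not at hc
        have h1 : a ≤ n / a := (Int.le_ediv_iff_mul_le (by omega)).mpr hc
        have h2 : n / a ≤ n / d := pv_ediv_le_ediv n d a (by omega) (by omega) (by omega)
        omega
      rw [if_neg hab, pvSdivs_eq_nil n a ha1 hnaa]
      rfl
    case pos =>
      rw [if_pos hab]
      have han : a ≤ n := by
        have h2 : n / d ≤ n / 1 := pv_ediv_le_ediv n 1 d (by omega) one_pos h1d
        rw [Int.ediv_one] at h2
        omega
      by_cases hdvd : PySem.Int.mod n a = 0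
      · rw [if_pos hdvd]
        have hadvd : a ∣ n := (PySem.Int.mod_eq_zero_iff_dvd n a).mp hdvd
        have hfd : PySem.Int.floordiv n a = n / a :=
          PySem.Int.floordiv_eq_ediv_of_pos (by omega)
        have hble : n / a ≤ b := by
          have := pv_ediv_le_ediv n d a (by omega) (by omega) (by omega)
          omega
        by_cases hsq : a * a ≤ n
        · -- a is a divisor below √n: it is the head of pvSdivs n a
          have hstep := ih (a + 1) (PySem.Int.floordiv n a) a
            (pvStepA n x y (m, r) a).1 (pvStepA n x y (m, r) a).2
            (by rw [hfd]; omega) ha1 (by omega) hadvd (by rw [hfd])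
            (fun e h1 h2 => absurd (by omega : e < e) (lt_irrefl e))
            ?_
          · rw [hstep, pvSdivs_cons n a han, if_pos ⟨hsq, hdvd⟩,
              List.singleton_append, List.foldl_cons]
          · -- the new min_diff is below every processed score
            intro e he1 he2 hed
            rw [pvStepA_eq]
            by_cases himp : pvScore n x y a < m
            · rw [if_pos himp]
              rcases (by omega : e < a ∨ e = a) with h | h
              · exact le_of_lt (lt_of_lt_of_le himp (hmin e he1 h hed))
              · exact le_of_eq (by rw [h])
            · rw [if_neg himp]
              rcases (by omega : e < a ∨ e = a) with h | h
              · exact hmin e he1 h hed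
              · exact h ▸ not_lt.mp himp
        · -- a is the lone divisor past √n: its partner was already processed, no update
          have hnaa : n < a * a := by omega
          have hp1 : (1:Int) ≤ n / a := (Int.le_ediv_iff_mul_le (by omega)).mpr (by omega)
          have hpa : n / a < a := (Int.ediv_lt_iff_lt_mul (by omega)).mpr hnaa
          have hmul : (n / a) * a = n := Int.ediv_mul_cancel hadvd
          have hpdvd : (n / a) ∣ n := ⟨a, hmul.symm⟩
          have hna : n / (n / a) = a := by
            set p := n / a with hp
            rw [← hmul]
            exact Int.mul_ediv_cancel_left a (by omega)
          have hscore : pvScore n x y (n / a) = pvScore n x y a :=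
            pvScore_symm n x y a (n / a) (by rw [hfd])
              (by rw [PySem.Int.floordiv_eq_ediv_of_pos (by omega), hna])
          have hnimp : ¬ pvScore n x y a < m := by
            have := hmin (n / a) hp1 (by omega) hpdvd
            rw [hscore] at this
            omega
          have hs : pvStepA n x y (m, r) a = (m, r) := by rw [pvStepA_eq, if_neg hnimp]
          rw [hs, pvSdivs_eq_nil n a ha1 hnaa]
          exact pvLoopA_exit n x y fuel (a + 1) _ m r (by rw [hfd]; omega)
      · rw [if_neg hdvd]
        have hnd : ¬ a ∣ n := fun h => hdvd ((PySem.Int.mod_eq_zero_iff_dvd n a).mpr h)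
        rw [ih (a + 1) b d m r (by omega) h1d (by omega) hdd hb
          (fun e h1 h2 => by
            rcases (by omega : e < a ∨ e = a) with h | h
            · exact hnod e h1 h
            · exact h ▸ hnd)
          (fun e he1 he2 hed => by
            rcases (by omega : e < a ∨ e = a) with h | h
            · exact hmin e he1 h hed
            · exact absurd (h ▸ hed) hnd)]
        by_cases hsq : a * a ≤ n
        · rw [pvSdivs_cons n a han, if_neg (fun hh => hdvd hh.2), List.nil_append]
        · rw [pvSdivs_eq_nil n a ha1 (by omega),
            pvSdivs_eq_nil n (a + 1) (by omega) (by nlinarith)]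

lemma pvMin?_cons (key : Int → Int) :
    ∀ (t : List Int) (c : Int),
      PySem.List.min? (c :: t) key
      = some (match PySem.List.min? t key with
              | none => c
              | some e => if key e < key c then e else c) := by
  intro t
  induction t with
  | nil => intro c; rfl
  | cons e t ih =>
    intro c
    have step : PySem.List.min? (c :: e :: t) key
        = PySem.List.min? ((if key e < key c then e else c) :: t) key := by
      by_cases h : key e < key c <;> simp only [PySem.List.min?, List.foldl_cons] <;> simp [h]
    rw [step, ih, ih e]
    by_cases h : key e < key c
    · simp only [if_pos h]
      cases hmt : PySem.List.min? t key with
      | none => simp [h]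
      | some e1 => simp only; split_ifs <;> simp_all <;> omega
    · simp only [if_neg h]
      cases hmt : PySem.List.min? t key with
      | none => simp [h]
      | some e1 => simp only; split_ifs <;> simp_all <;> omega

-- on a strictly increasing list, min?'s first-minimum is ≤ every other minimum
lemma pvMin?_least (key : Int → Int) :
    ∀ (L : List Int), L.Pairwise (· < ·) → ∀ e, PySem.List.min? L key = some e →
      ∀ e' ∈ L, key e' ≤ key e → e ≤ e' := by
  intro L
  induction L with
  | nil => intro _ e he; simp [PySem.List.min?] at he
  | cons c t ih =>
    intro hpw e he e' he' hk
    rw [pvMin?_cons] at he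
    rw [List.pairwise_cons] at hpw
    cases hmt : PySem.List.min? t key with
    | none =>
      rw [hmt] at he
      have het : t = [] := (PySem.List.min?_eq_none_iff t key).mp hmt
      simp only [Option.some.injEq] at he
      subst he
      rcases List.mem_cons.mp he' with h | h
      · omega
      · rw [het] at h; cases h
    | some e1 =>
      rw [hmt] at he
      simp only [Option.some.injEq] at he
      by_cases hlt : key e1 < key c
      · rw [if_pos hlt] at he
        subst he
        rcases List.mem_cons.mp he' with h | h
        · subst h; omega
        · exact ih hpw.2 e1 hmt e' h hk
      · rw [if_neg hlt] at he
        subst he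
        rcases List.mem_cons.mp he' with h | h
        · exact le_of_eq h.symm
        · exact le_of_lt (hpw.1 e' h)

-- the fold of A's body over any candidate list, via Python's min(…, key=…)
lemma pvFold_eq_min? (n x y : Int) :
    ∀ (L : List Int) (m : Int) (r : Option (Int × Int)),
      List.foldl (pvStepA n x y) (m, r) L =
        (match PySem.List.min? L (pvScore n x y) with
         | none => (m, r)
         | some e =>
             if pvScore n x y e < m then (pvScore n x y e, some (pvOrient n x y e)) else (m, r)) := by
  intro L
  induction L with
  | nil => intro m r; rfl
  | cons e t ih =>
    intro m r
    rw [List.foldl_cons, pvStepA_eq, pvMin?_cons]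
    by_cases h : pvScore n x y e < m
    · rw [if_pos h, ih]
      cases hmt : PySem.List.min? t (pvScore n x y) with
      | none => simp [h]
      | some e1 => simp only; split_ifs <;> simp_all <;> omega
    · rw [if_neg h, ih]
      cases hmt : PySem.List.min? t (pvScore n x y) with
      | none => simp [h]
      | some e1 => simp only; split_ifs <;> simp_all <;> omega

-- A's full loop is the fold over all divisors up to √n
lemma pvA_fold (n x y : Int) (hn : 1 ≤ n) :
    pvLoopA n x y (n + 2).toNat 1 n 8192 none =
      (List.foldl (pvStepA n x y) (8192, none) (pvSdivs n 1)).2 := by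
  have hf : (n + 2).toNat = (n + 1).toNat + 1 := by omega
  rw [hf, pvLoopA_succ, if_pos hn,
    if_pos ((PySem.Int.mod_eq_zero_iff_dvd n 1).mpr (one_dvd n))]
  have hfd : PySem.Int.floordiv n 1 = n / 1 := PySem.Int.floordiv_eq_ediv_of_pos one_pos
  rw [pvLoopA_eq n x y hn (n + 1).toNat (1 + 1) (PySem.Int.floordiv n 1) 1
    (pvStepA n x y (8192, none) 1).1 (pvStepA n x y (8192, none) 1).2
    (by rw [hfd, Int.ediv_one]; omega) le_rfl (by omega) (one_dvd n) (by rw [hfd])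
    (fun e h1 h2 => absurd (by omega : (1:Int) < 1) (lt_irrefl 1))
    (fun e he1 he2 hed => by
      have he : e = 1 := by omega
      rw [pvStepA_eq]
      by_cases himp : pvScore n x y 1 < 8192
      · rw [if_pos himp, he]
      · rw [if_neg himp, he]
        exact not_lt.mp himp)]
  rw [pvSdivs_cons n 1 hn,
    if_pos ⟨by omega, (PySem.Int.mod_eq_zero_iff_dvd n 1).mpr (one_dvd n)⟩,
    List.singleton_append, List.foldl_cons]

-- ===== B-side lemmas =====

lemma pv_window_bounds (n lo hi a : Int) (ha : a ∈ pvWindow n lo hi) : 1 ≤ a ∧ a ≤ n := by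
  unfold pvWindow at ha
  rw [PySem.List.mem_pyRange_one] at ha
  have h1 : (1:Int) ≤ max 1 lo := le_max_left 1 lo
  have h2 : min n hi ≤ n := min_le_left n hi
  omega

lemma pv_window_mem (n lo hi a : Int) (h1 : 1 ≤ a) (han : a ≤ n) (hlo : lo ≤ a)
    (hhi : a ≤ hi) : a ∈ pvWindow n lo hi := by
  unfold pvWindow
  rw [PySem.List.mem_pyRange_one]
  have hx : max 1 lo ≤ a := max_le h1 hlo
  have hy : a ≤ min n hi := le_min han hhi
  omega

-- any divisor scoring below the threshold lies in one of the two windows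
lemma pv_score_window (n x y d : Int) (h1 : 1 ≤ d) (han : d ≤ n)
    (hs : pvScore n x y d < 8192) :
    d ∈ pvWindow n (x - 8191) (x + 8191) ++ pvWindow n (y - 8191) (y + 8191) := by
  have hb1 := abs_nonneg (PySem.Int.floordiv n d - y)
  have hb2 := abs_nonneg (PySem.Int.floordiv n d - x)
  rw [List.mem_append]
  rcases min_lt_iff.mp hs with h | h
  · left
    have hdx : |d - x| < 8192 := by linarith
    rcases abs_lt.mp hdx with ⟨hl, hr⟩
    exact pv_window_mem n (x - 8191) (x + 8191) d h1 han (by omega) (by omega)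
  · right
    have hdy : |d - y| < 8192 := by linarith
    rcases abs_lt.mp hdy with ⟨hl, hr⟩
    exact pv_window_mem n (y - 8191) (y + 8191) d h1 han (by omega) (by omega)

lemma pvLexLe_trans (p q r : Int × Int) (h1 : pvLexLe p q) (h2 : pvLexLe q r) : pvLexLe p r := by
  unfold pvLexLe at *
  omega

-- one step of B's loop: it keeps a some-state, only improves lexicographically, and
-- either leaves the state alone or installs the current divisor's (score, divisor) pair
lemma pvStepB_facts (n x y a : Int) (o : Option (Int × Int)) :
    (pvStepB n x y o a = o ∨
      (PySem.Int.mod n a = 0 ∧ pvStepB n x y o a = some (pvScore n x y a, a))) ∧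
    (PySem.Int.mod n a = 0 →
      ∃ p, pvStepB n x y o a = some p ∧ pvLexLe p (pvScore n x y a, a)) ∧
    (∀ p, o = some p → ∃ q, pvStepB n x y o a = some q ∧ pvLexLe q p) := by
  by_cases hm : PySem.Int.mod n a = 0
  · cases o with
    | none =>
      refine ⟨Or.inr ⟨hm, by simp [pvStepB, hm, pvScore]⟩, ?_, ?_⟩
      · exact fun _ => ⟨(pvScore n x y a, a), by simp [pvStepB, hm, pvScore],
          Or.inr ⟨rfl, le_rfl⟩⟩
      · intro p hp; cases hp
    | some p =>
      have hstep : pvStepB n x y (some p) a =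
          if pvScore n x y a < p.1 ∨ (pvScore n x y a = p.1 ∧ a < p.2)
          then some (pvScore n x y a, a) else some p := by
        simp [pvStepB, hm, pvScore]
      by_cases hc : pvScore n x y a < p.1 ∨ (pvScore n x y a = p.1 ∧ a < p.2)
      · rw [hstep, if_pos hc]
        refine ⟨Or.inr ⟨hm, rfl⟩, fun _ => ⟨_, rfl, Or.inr ⟨rfl, le_rfl⟩⟩, ?_⟩
        intro q hq
        cases hq
        exact ⟨(pvScore n x y a, a), rfl, by unfold pvLexLe; simp only at hc ⊢; omega⟩
      · rw [hstep, if_neg hc]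
        refine ⟨Or.inl rfl, fun _ => ⟨p, rfl, ?_⟩, ?_⟩
        · unfold pvLexLe; simp only at hc ⊢; omega
        · intro q hq; cases hq; exact ⟨p, rfl, Or.inr ⟨rfl, le_rfl⟩⟩
  · have hstep : pvStepB n x y o a = o := by simp [pvStepB, hm]
    exact ⟨Or.inl hstep, fun h => absurd h hm, fun p hp =>
      ⟨p, by rw [hstep, hp], Or.inr ⟨rfl, le_rfl⟩⟩⟩

-- B's fold: the result is some divisor's (score, divisor) pair (unless nothing divided),
-- and it is a lexicographic lower bound of every divisor candidate in the list
lemma pvFoldB_char (n x y : Int) :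
    ∀ (L : List Int) (o : Option (Int × Int)),
      (List.foldl (pvStepB n x y) o L = o ∨
        ∃ a ∈ L, PySem.Int.mod n a = 0 ∧
          List.foldl (pvStepB n x y) o L = some (pvScore n x y a, a)) ∧
      (∀ a ∈ L, PySem.Int.mod n a = 0 →
        ∃ p, List.foldl (pvStepB n x y) o L = some p ∧ pvLexLe p (pvScore n x y a, a)) ∧
      (∀ p, o = some p →
        ∃ q, List.foldl (pvStepB n x y) o L = some q ∧ pvLexLe q p) := by
  intro L
  induction L with
  | nil =>
    intro o
    exact ⟨Or.inl rfl, fun a ha => absurd ha (List.not_mem_nil), fun p hp => ⟨p, hp, Or.inr ⟨rfl, le_rfl⟩⟩⟩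
  | cons c t ih =>
    intro o
    rw [List.foldl_cons]
    obtain ⟨hs1, hs2, hs3⟩ := pvStepB_facts n x y c o
    obtain ⟨ih1, ih2, ih3⟩ := ih (pvStepB n x y o c)
    refine ⟨?_, ?_, ?_⟩
    · rcases ih1 with h | ⟨a, ha, hm, hr⟩
      · rcases hs1 with h' | ⟨hm, h'⟩
        · exact Or.inl (by rw [h, h'])
        · exact Or.inr ⟨c, List.mem_cons_self, hm, by rw [h, h']⟩
      · exact Or.inr ⟨a, List.mem_cons_of_mem c ha, hm, hr⟩
    · intro a ha hm
      rcases List.mem_cons.mp ha with h | h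
      · subst h
        obtain ⟨p, hp, hlex⟩ := hs2 hm
        obtain ⟨q, hq, hlex'⟩ := ih3 p hp
        exact ⟨q, hq, pvLexLe_trans q p _ hlex' hlex⟩
      · exact ih2 a h hm
    · intro p hp
      obtain ⟨q, hq, hlex⟩ := hs3 p hp
      obtain ⟨q', hq', hlex'⟩ := ih3 q hq
      exact ⟨q', hq', pvLexLe_trans q' q p hlex' hlex⟩

-- ===== VERDICT (by name: the statement is the Claim_ definition above) =====
theorem find_two_numbers_spec : Claim_equal_find_two_numbers := by
  intro n x y _hdom hpre
  unfold Spec_find_two_numbers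
  obtain ⟨hn, a0, ha0W, ha0mod, ha0sc'⟩ := hpre
  have ha0sc : pvScore n x y a0 < 8192 := ha0sc'
  have ha0b : 1 ≤ a0 ∧ a0 ≤ n := by
    rcases List.mem_append.mp ha0W with h | h
    · exact pv_window_bounds _ _ _ _ h
    · exact pv_window_bounds _ _ _ _ h
  obtain ⟨c, hcS, hcsc, _⟩ := pvPartner n x y a0 hn ha0b.1 ha0b.2 ha0mod
  cases hmin : PySem.List.min? (pvSdivs n 1) (pvScore n x y) with
  | none =>
    exact absurd ((PySem.List.min?_eq_none_iff _ _).mp hmin ▸ hcS) (List.not_mem_nil)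
  | some estar =>
    -- the winning divisor of A's scan and its properties
    have hsc : pvScore n x y estar < 8192 := by
      have := PySem.List.min?_isMin hmin c hcS
      rw [hcsc] at this
      omega
    have hestarS : estar ∈ pvSdivs n 1 := PySem.List.min?_mem hmin
    obtain ⟨he1, hen, hesq, hemod⟩ := pv_sdivs_mem n 1 estar hestarS
    have hestarW := pv_score_window n x y estar he1 hen hsc
    -- characterize B's fold over the two windows
    obtain ⟨hch1, hch2, _⟩ := pvFoldB_char n x y
      (pvWindow n (x - 8191) (x + 8191) ++ pvWindow n (y - 8191) (y + 8191)) none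
    obtain ⟨p, hp, hplex⟩ := hch2 estar hestarW hemod
    rcases hch1 with h | ⟨d0, hd0W, hd0mod, hd0eq⟩
    · rw [h] at hp; cases hp
    · rw [hd0eq] at hp
      cases hp
      -- now p = (pvScore d0, d0), and it is lex-≤ (pvScore estar, estar)
      have hd0b : 1 ≤ d0 ∧ d0 ≤ n := by
        rcases List.mem_append.mp hd0W with h | h
        · exact pv_window_bounds _ _ _ _ h
        · exact pv_window_bounds _ _ _ _ h
      obtain ⟨d0m, hd0mS, hd0msc, hd0mle⟩ := pvPartner n x y d0 hn hd0b.1 hd0b.2 hd0mod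
      have hge : pvScore n x y estar ≤ pvScore n x y d0 := by
        have := PySem.List.min?_isMin hmin d0m hd0mS
        rw [hd0msc] at this
        exact this
      have hseq : pvScore n x y d0 = pvScore n x y estar ∧ d0 ≤ estar := by
        unfold pvLexLe at hplex
        simp only at hplex
        omega
      have hle2 : estar ≤ d0m := by
        refine pvMin?_least (pvScore n x y) (pvSdivs n 1)
          (pv_sdivs_pairwise n n.toNat 1 le_rfl (by omega)) estar hmin d0m hd0mS ?_
        rw [hd0msc, hseq.1]
      have hd0estar : d0 = estar := by omega
      -- both sides now reduce to the same oriented pair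
      have hA : find_two_numbers n x y = pvOrient n x y estar := by
        have h1 : find_two_numbers n x y =
            (match pvLoopA n x y (n + 2).toNat 1 n 8192 none with
             | some r => r
             | none => ((0, 0) : Int × Int)) := rfl
        rw [h1, pvA_fold n x y hn, pvFold_eq_min?, hmin]
        simp [hsc]
      have hB : find_two_numbers_alt n x y = pvOrient n x y d0 := by
        have h2 : find_two_numbers_alt n x y =
            (match List.foldl (pvStepB n x y)
                (List.foldl (pvStepB n x y) none (pvWindow n (x - 8191) (x + 8191)))
                (pvWindow n (y - 8191) (y + 8191)) with
             | none => ((0, 0) : Int × Int)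
             | some (_, a) =>
               let b := PySem.Int.floordiv n a
               if |a - x| + |b - y| < |a - y| + |b - x| then (a, b) else (b, a)) := rfl
        rw [h2, ← List.foldl_append, hd0eq]
        rfl
      rw [hA, hB, hd0estar]
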